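-- pv_equiv track=rewrite | github.com/denilsonsa/gpiozero-matrix-keypad | keypad_gpiozero.py | is_it_ambiguous
-- ===== SOURCE A (Python) =====
-- from collections import defaultdict
--
-- def is_it_ambiguous(set_of_tuples):
--     """
--     Given a value in the format of set of tuples of row/col coords, returns
--     True if this value is ambiguous.
--
--     Matrix keypads are extremely simple devices: one wire for each row, one
--     wire for each column, and a button connecting each row/column pair.
--     Thus, if three buttons are pressed in a certain way (sharing both a
--     row wire and a column wire), then a fourth button press will be read by
--     the circuit, even if that fourth button is not pressed. In such case,
--     the value is ambiguous, because the code reads four buttons, but it's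
--     impossible to know if all four are pressed, or which one of those four
--     buttons is not pressed.
--
--     As another way to understand it, any read that contains four buttons as
--     corners of a rectangle is ambiguous.
--
--     If you are confused, just remember:
--
--     * Zero buttons pressed are never ambiguous.
--     * One button pressed is never ambiguous.
--     * Two buttons pressed is never ambiguous.
--     * Three buttons read as pressed is never ambiguous.
--     * Four or more buttons read as pressed may be ambiguous (i.e. may
--     include ghost presses).
--     """
--
--     items_per_row = defaultdict(list)
--     items_per_col = defaultdict(list)
--
--     for (rowno, colno) in set_of_tuples:
--         items_per_row[rowno].append(colno)
--         items_per_col[colno].append(rowno)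
--
--     for row in items_per_row.values():
--         if len(row) > 1:
--             for colno in row:
--                 if len(items_per_col[colno]) > 1:
--                     return True
--
--     return False
-- ===== SOURCE B (Python) =====
-- def is_it_ambiguous(set_of_tuples):
--     """Brute-force re-implementation: a read is ambiguous iff some button has
--     another button (at a different position) sharing its row AND another one
--     sharing its column.  Checked directly by pairwise index scans over the
--     buttons -- no dictionaries or counters are built."""
--     buttons = list(set_of_tuples)
--     n = len(buttons)
--     for i in range(n):
--         r, c = buttons[i]
--         if any(j != i and buttons[j][0] == r for j in range(n)) \
--            and any(j != i and buttons[j][1] == c for j in range(n)):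
--             return True
--     return False
-- ===== Notes on version B (the rewrite author's own statement) =====
-- stated objective: alternative
-- what changed: Replaced A's per-row/per-column adjacency-list dicts and heavy-row scan by direct pairwise index scans: for each button, look for another button at a different index sharing its row and another sharing its column; no auxiliary dictionaries, trading O(n) for O(n^2).
import Mathlib
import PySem

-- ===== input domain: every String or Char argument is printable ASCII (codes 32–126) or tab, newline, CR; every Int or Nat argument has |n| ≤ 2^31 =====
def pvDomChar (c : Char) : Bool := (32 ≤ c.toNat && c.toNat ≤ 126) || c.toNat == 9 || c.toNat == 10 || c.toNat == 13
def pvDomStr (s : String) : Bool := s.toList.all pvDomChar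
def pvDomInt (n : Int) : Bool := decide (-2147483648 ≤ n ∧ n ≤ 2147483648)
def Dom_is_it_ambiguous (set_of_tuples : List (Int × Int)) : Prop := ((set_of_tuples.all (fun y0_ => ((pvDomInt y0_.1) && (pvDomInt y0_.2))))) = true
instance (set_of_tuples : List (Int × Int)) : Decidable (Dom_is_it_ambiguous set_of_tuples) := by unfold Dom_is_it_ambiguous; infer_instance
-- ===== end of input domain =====

-- B replaces A's per-row/per-column adjacency dicts by direct pairwise index
-- scans over the buttons (objective: alternative algorithm; not faster).


-- ===== PORT A =====
-- builds items_per_row and items_per_col in one loop (defaultdict(list).append),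
-- then scans rows with > 1 entry for a column shared with another row.
def is_it_ambiguous (set_of_tuples : List (Int × Int)) : Bool :=
  let dicts := set_of_tuples.foldl
    (fun (d : PySem.Dict Int (List Int) × PySem.Dict Int (List Int)) p =>
      (d.1.modify p.1 [] (· ++ [p.2]), d.2.modify p.2 [] (· ++ [p.1])))
    (PySem.Dict.empty, PySem.Dict.empty)
  dicts.1.values.any (fun row =>
    decide (1 < row.length) &&
      row.any (fun colno => decide (1 < (dicts.2.getD colno []).length)))

-- ===== PORT B =====
-- pairwise index scans: for each button i, look for a different index j
-- sharing its row, and a different index j sharing its column.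
-- buttons[j] with 0 ≤ j < n is ported as List.getD (always in range, exact).
def is_it_ambiguous_alt (set_of_tuples : List (Int × Int)) : Bool :=
  let n := set_of_tuples.length
  (List.range n).any (fun i =>
    let p := set_of_tuples.getD i (0, 0)
    ((List.range n).any (fun j =>
        decide (j ≠ i) && ((set_of_tuples.getD j (0, 0)).1 == p.1))) &&
    ((List.range n).any (fun j =>
        decide (j ≠ i) && ((set_of_tuples.getD j (0, 0)).2 == p.2))))

-- ===== PRECONDITION & SPEC =====
def Spec_is_it_ambiguous (set_of_tuples : List (Int × Int)) (out : Bool) : Prop := out = is_it_ambiguous_alt set_of_tuples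
instance (set_of_tuples : List (Int × Int)) (out : Bool) : Decidable (Spec_is_it_ambiguous set_of_tuples out) := by unfold Spec_is_it_ambiguous; infer_instance

-- ===== CLAIM =====
def Claim_equal_is_it_ambiguous : Prop := ∀ (set_of_tuples : List (Int × Int)), Dom_is_it_ambiguous set_of_tuples → Spec_is_it_ambiguous set_of_tuples (is_it_ambiguous set_of_tuples)

-- ===== LEMMAS AND PROOFS =====

-- common characterisation: some button has >1 buttons in its row and >1 in its column
def Amb (l : List (Int × Int)) : Prop :=
  ∃ p ∈ l, 1 < (l.map (·.1)).count p.1 ∧ 1 < (l.map (·.2)).count p.2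

-- ---- A side (adjacency dicts) ----

def rowDict (l : List (Int × Int)) : PySem.Dict Int (List Int) :=
  l.foldl (fun d p => d.modify p.1 [] (· ++ [p.2])) PySem.Dict.empty

def colDict (l : List (Int × Int)) : PySem.Dict Int (List Int) :=
  l.foldl (fun d p => d.modify p.2 [] (· ++ [p.1])) PySem.Dict.empty

theorem foldl_pair_split (l : List (Int × Int)) :
    l.foldl
      (fun (d : PySem.Dict Int (List Int) × PySem.Dict Int (List Int)) p =>
        (d.1.modify p.1 [] (· ++ [p.2]), d.2.modify p.2 [] (· ++ [p.1])))
      (PySem.Dict.empty, PySem.Dict.empty) = (rowDict l, colDict l) := by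
  exact PySem.List.foldl_prod_mk
    (f := fun (d : PySem.Dict Int (List Int)) (p : Int × Int) => d.modify p.1 [] (· ++ [p.2]))
    (g := fun (d : PySem.Dict Int (List Int)) (p : Int × Int) => d.modify p.2 [] (· ++ [p.1])) l _ _

theorem rowDict_getD (l : List (Int × Int)) (r : Int) :
    (rowDict l).getD r [] = (l.filter (fun p => p.1 == r)).map (·.2) := by
  simpa using PySem.Dict.getD_foldl_modify_append l PySem.Dict.empty r

theorem colDict_getD (l : List (Int × Int)) (c : Int) :
    (colDict l).getD c [] = (l.filter (fun p => p.2 == c)).map (·.1) := by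
  have h := PySem.Dict.getD_foldl_modify_append (l.map Prod.swap) PySem.Dict.empty c
  rw [List.foldl_map] at h
  simp only [Prod.swap] at h
  unfold colDict
  rw [h]
  simp [PySem.Dict.getD_empty, List.filter_map, Function.comp_def]

theorem length_colDict_getD (l : List (Int × Int)) (c : Int) :
    ((colDict l).getD c []).length = (l.map (·.2)).count c := by
  rw [colDict_getD, List.length_map, List.count_eq_countP, List.countP_map,
    List.countP_eq_length_filter]
  simp [Function.comp_def]

theorem length_rowDict_getD (l : List (Int × Int)) (r : Int) :
    ((rowDict l).getD r []).length = (l.map (·.1)).count r := by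
  rw [rowDict_getD, List.length_map, List.count_eq_countP, List.countP_map,
    List.countP_eq_length_filter]
  simp [Function.comp_def]

theorem rowDict_keys_nodup (l : List (Int × Int)) : (rowDict l).keys.Nodup :=
  PySem.Dict.nodup_keys_foldl_modify_key l (·.1) [] _ _ PySem.Dict.nodup_keys_empty

theorem mem_rowDict_keys (l : List (Int × Int)) (r : Int) :
    r ∈ (rowDict l).keys ↔ r ∈ l.map (·.1) := by
  unfold rowDict
  rw [PySem.Dict.keys_foldl_modify_key]
  simp [PySem.Set.mem_update, PySem.Dict.keys_empty]

theorem portA_iff_Amb (l : List (Int × Int)) : is_it_ambiguous l = true ↔ Amb l := by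
  unfold is_it_ambiguous Amb
  rw [foldl_pair_split]
  simp only
  rw [PySem.Dict.values_eq_map_keys (rowDict l) (rowDict_keys_nodup l) []]
  simp only [List.any_map, List.any_eq_true, Function.comp_def,
    Bool.and_eq_true, decide_eq_true_eq]
  constructor
  · rintro ⟨r, hr, hlen, c, hc, hclen⟩
    rw [rowDict_getD] at hc
    simp only [List.mem_map, List.mem_filter, beq_iff_eq] at hc
    obtain ⟨p, ⟨hp, hp1⟩, hp2⟩ := hc
    refine ⟨p, hp, ?_, ?_⟩
    · rw [length_rowDict_getD] at hlen; rw [hp1]; exact hlen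
    · rw [length_colDict_getD] at hclen; rw [hp2]; exact hclen
  · rintro ⟨p, hp, hrc, hcc⟩
    refine ⟨p.1, ?_, ?_, p.2, ?_, ?_⟩
    · rw [mem_rowDict_keys]; exact List.mem_map_of_mem hp
    · rw [length_rowDict_getD]; exact hrc
    · rw [rowDict_getD]
      simp only [List.mem_map, List.mem_filter, beq_iff_eq]
      exact ⟨p, ⟨hp, rfl⟩, rfl⟩
    · rw [length_colDict_getD]; exact hcc

-- ---- B side (index scans) ----

theorem map_getD_range {α : Type} (l : List α) (d : α) :
    (List.range l.length).map (fun j => l.getD j d) = l := by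
  apply List.ext_getElem
  · simp
  · intro i h1 h2
    simp [List.getD_eq_getElem?_getD, List.getElem?_eq_getElem h2]

theorem getD_lt {α : Type} (l : List α) (d : α) (j : ℕ) (h : j < l.length) :
    l.getD j d = l[j] := by
  simp [List.getD_eq_getElem?_getD, List.getElem?_eq_getElem h]

-- an index j ≠ i with Q l[j] exists iff Q is satisfied at least twice,
-- given that Q already holds at index i
theorem any_other_iff {α : Type} (l : List α) (d : α) (Q : α → Bool) (i : ℕ)
    (hi : i < l.length) (hQi : Q (l.getD i d) = true) :
    ((List.range l.length).any (fun j => decide (j ≠ i) && Q (l.getD j d)) = true)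
      ↔ 1 < l.countP Q := by
  have hcount : l.countP Q
      = ((List.range l.length).filter (fun j => Q (l.getD j d))).length := by
    conv_lhs => rw [← map_getD_range l d]
    rw [List.countP_map, List.countP_eq_length_filter]
    rfl
  have hmemi : i ∈ (List.range l.length).filter (fun j => Q (l.getD j d)) := by
    simp [List.mem_filter, List.mem_range, hi, getD_lt _ _ _ hi ▸ hQi]
  have hnd : ((List.range l.length).filter (fun j => Q (l.getD j d))).Nodup :=
    (List.nodup_range).filter _
  rw [hcount]
  constructor
  · rintro h
    simp only [List.any_eq_true, List.mem_range, Bool.and_eq_true, decide_eq_true_eq] at h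
    obtain ⟨j, hj, hji, hQj⟩ := h
    have hmemj : j ∈ (List.range l.length).filter (fun j => Q (l.getD j d)) := by
      simp [List.mem_filter, List.mem_range, hj, getD_lt _ _ _ hj ▸ hQj]
    rcases hf : (List.range l.length).filter (fun j => Q (l.getD j d)) with _ | ⟨x, _ | ⟨y, t⟩⟩
    · rw [hf] at hmemi; simp at hmemi
    · rw [hf] at hmemi hmemj
      simp at hmemi hmemj
      exact absurd (hmemj.trans hmemi.symm) hji
    · simp
  · intro h
    rcases hf : (List.range l.length).filter (fun j => Q (l.getD j d)) with _ | ⟨x, _ | ⟨y, t⟩⟩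
    · rw [hf] at hmemi; simp at hmemi
    · rw [hf] at h; simp at h
    · rw [hf] at hnd
      have hxy : x ≠ y := by rintro rfl; simp at hnd
      have hx : x ∈ (List.range l.length).filter (fun j => Q (l.getD j d)) := by
        rw [hf]; exact List.mem_cons_self ..
      have hy : y ∈ (List.range l.length).filter (fun j => Q (l.getD j d)) := by
        rw [hf]; exact List.mem_cons_of_mem _ (List.mem_cons_self ..)
      simp only [List.mem_filter, List.mem_range] at hx hy
      simp only [List.any_eq_true, List.mem_range, Bool.and_eq_true, decide_eq_true_eq]
      by_cases hxi : x = i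
      · exact ⟨y, hy.1, fun e => hxy (hxi.trans e.symm), hy.2⟩
      · exact ⟨x, hx.1, hxi, hx.2⟩

theorem portB_iff_Amb (l : List (Int × Int)) : is_it_ambiguous_alt l = true ↔ Amb l := by
  unfold is_it_ambiguous_alt Amb
  simp only [List.any_eq_true, List.mem_range, Bool.and_eq_true]
  constructor
  · rintro ⟨i, hi, h1, h2⟩
    set p := l.getD i (0, 0) with hp
    have hpi : p ∈ l := by
      rw [hp, List.getD_eq_getElem?_getD, List.getElem?_eq_getElem hi]
      exact List.getElem_mem _
    refine ⟨p, hpi, ?_, ?_⟩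
    · rw [List.count_eq_countP, List.countP_map]
      rw [← any_other_iff l (0,0) _ i hi (by rw [hp]; simp)]
      simpa using h1
    · rw [List.count_eq_countP, List.countP_map]
      rw [← any_other_iff l (0,0) _ i hi (by rw [hp]; simp)]
      simpa using h2
  · rintro ⟨p, hp, h1, h2⟩
    obtain ⟨i, hi, hip⟩ := List.getElem_of_mem hp
    have hgd : l.getD i (0, 0) = p := by
      rw [List.getD_eq_getElem?_getD, List.getElem?_eq_getElem hi, hip]; rfl
    have hgd2 : l[i]?.getD ((0:ℤ), (0:ℤ)) = p := by
      rw [List.getElem?_eq_getElem hi]; exact hip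
    refine ⟨i, hi, ?_, ?_⟩
    · rw [List.count_eq_countP, List.countP_map] at h1
      have := (any_other_iff l (0,0) (fun x => x.1 == p.1) i hi (by rw [hgd]; simp)).2 h1
      simpa [← hgd2] using this
    · rw [List.count_eq_countP, List.countP_map] at h2
      have := (any_other_iff l (0,0) (fun x => x.2 == p.2) i hi (by rw [hgd]; simp)).2 h2
      simpa [← hgd2] using this

-- ===== VERDICT =====
theorem is_it_ambiguous_spec : Claim_equal_is_it_ambiguous := by
  intro l _
  unfold Spec_is_it_ambiguous
  rw [Bool.eq_iff_iff, portA_iff_Amb, portB_iff_Amb]
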